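-- pv_equiv track=rewrite | github.com/wilson51678/sc-projects | stanCode_Projects/boggle_game_solver/boggle.py | check_form
-- ===== SOURCE A (Python) =====
-- def check_form(row):
-- 	"""
-- 	This function check the string that user entered is regulated.
-- 	:param row: string, a string of words
-- 	:return: boolean
-- 	"""
-- 	# check the length of row is regulated
-- 	if len(row) < 6 or len(row) > 7:
-- 		return False
-- 	else:
-- 		for i in range(len(row)):
-- 			ch = row[i]
-- 			# check the user enter space between every character
-- 			if i % 2 == 1:
-- 				if ch != ' ':
-- 					return False
-- 			else:
-- 				if not ch.isalpha():
-- 					return False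
-- 		return True
-- ===== SOURCE B (Python) =====
-- def check_form(row):
--     if len(row) < 6 or len(row) > 7:
--         return False
--     letters = row[::2]
--     spaces = row[1::2]
--     return letters.isalpha() and spaces == ' ' * len(spaces)
-- ===== Notes on version B (the rewrite author's own statement) =====
-- stated objective: simpler
-- what changed: Replaces the indexed per-character parity loop with two whole-slice checks: row[::2].isalpha() for the letters and an equality of row[1::2] against a run of spaces.
import Mathlib
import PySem

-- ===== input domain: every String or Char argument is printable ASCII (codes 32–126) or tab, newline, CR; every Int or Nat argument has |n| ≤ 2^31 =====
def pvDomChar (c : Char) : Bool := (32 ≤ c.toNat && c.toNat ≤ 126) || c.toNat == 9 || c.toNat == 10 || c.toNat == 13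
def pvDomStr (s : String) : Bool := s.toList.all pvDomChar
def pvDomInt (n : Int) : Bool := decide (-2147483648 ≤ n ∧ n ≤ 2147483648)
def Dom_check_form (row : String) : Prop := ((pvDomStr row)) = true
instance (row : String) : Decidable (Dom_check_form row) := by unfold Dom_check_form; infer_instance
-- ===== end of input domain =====

-- B replaces A's indexed parity loop by two whole-slice checks (letters = row[::2], spaces = row[1::2]); simpler, same cost.

-- ===== PORT A =====
-- the for-loop over range(len(row)) with early returns, as recursion over the enumerated characters
def check_form_go : List (Int × Char) → Bool
  | [] => true
  | (i, ch) :: rest =>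
    if PySem.Int.mod i 2 == 1 then
      if ch ≠ ' ' then false else check_form_go rest
    else
      if ¬ PySem.Chars.isalpha ch then false else check_form_go rest

def check_form (row : String) : Bool :=
  if row.toList.length < 6 ∨ row.toList.length > 7 then false
  else check_form_go (PySem.List.enumerate row.toList)

-- ===== PORT B =====
def check_form_alt (row : String) : Bool :=
  if row.toList.length < 6 ∨ row.toList.length > 7 then false
  else
    let letters := (PySem.Chars.slice? row.toList none none 2).getD []
    let spaces := (PySem.Chars.slice? row.toList (some 1) none 2).getD []
    PySem.Chars.strIsalpha letters && (spaces == List.replicate spaces.length ' ')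

-- ===== PRECONDITION & SPEC =====
def Spec_check_form (row : String) (out : Bool) : Prop := out = check_form_alt row
instance (row : String) (out : Bool) : Decidable (Spec_check_form row out) := by unfold Spec_check_form; infer_instance

-- ===== CLAIM (what is proved, stated in full; the proofs are below) =====
def Claim_equal_check_form : Prop := ∀ (row : String), Dom_check_form row → Spec_check_form row (check_form row)

-- ===== LEMMAS AND PROOFS =====

theorem check_form_eq_alt (cs : List Char) :
    (if cs.length < 6 ∨ cs.length > 7 then false
     else check_form_go (PySem.List.enumerate cs)) =
    (if cs.length < 6 ∨ cs.length > 7 then false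
     else
       let letters := (PySem.Chars.slice? cs none none 2).getD []
       let spaces := (PySem.Chars.slice? cs (some 1) none 2).getD []
       PySem.Chars.strIsalpha letters && (spaces == List.replicate spaces.length ' ')) := by
  by_cases h : cs.length < 6 ∨ cs.length > 7
  · simp [h]
  · push Not at h
    obtain ⟨h6, h7⟩ := h
    match cs with
    | [a, b, c, d, e, f] =>
      have hs1 : PySem.Chars.slice? [a,b,c,d,e,f] none none 2 = some [a,c,e] := by
        simp [PySem.Chars.slice?_eq_listSlice?, PySem.List.slice?, PySem.List.sliceIndices,
          List.range_succ]
      have hs2 : PySem.Chars.slice? [a,b,c,d,e,f] (some 1) none 2 = some [b,d,f] := by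
        simp [PySem.Chars.slice?_eq_listSlice?, PySem.List.slice?, PySem.List.sliceIndices,
          List.range_succ]
      rw [if_neg (by simp), if_neg (by simp), hs1, hs2]
      simp [check_form_go, PySem.List.enumerate, PySem.Chars.strIsalpha, PySem.Int.mod,
        List.replicate]
      cases ha : PySem.Chars.isalpha a <;> cases hb : decide (b = ' ') <;>
        cases hc : PySem.Chars.isalpha c <;> cases hd : decide (d = ' ') <;>
        cases he : PySem.Chars.isalpha e <;> cases hf : decide (f = ' ') <;> simp_all
    | [a, b, c, d, e, f, g] =>
      have hs1 : PySem.Chars.slice? [a,b,c,d,e,f,g] none none 2 = some [a,c,e,g] := by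
        simp [PySem.Chars.slice?_eq_listSlice?, PySem.List.slice?, PySem.List.sliceIndices,
          List.range_succ]
      have hs2 : PySem.Chars.slice? [a,b,c,d,e,f,g] (some 1) none 2 = some [b,d,f] := by
        simp [PySem.Chars.slice?_eq_listSlice?, PySem.List.slice?, PySem.List.sliceIndices,
          List.range_succ]
      rw [if_neg (by simp), if_neg (by simp), hs1, hs2]
      simp [check_form_go, PySem.List.enumerate, PySem.Chars.strIsalpha, PySem.Int.mod,
        List.replicate]
      cases ha : PySem.Chars.isalpha a <;> cases hb : decide (b = ' ') <;>
        cases hc : PySem.Chars.isalpha c <;> cases hd : decide (d = ' ') <;>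
        cases he : PySem.Chars.isalpha e <;> cases hf : decide (f = ' ') <;>
        cases hg : PySem.Chars.isalpha g <;> simp_all
    | a :: b :: c :: d :: e :: f :: g :: x :: rest => simp at h7; omega
    | [] | [_] | [_,_] | [_,_,_] | [_,_,_,_] | [_,_,_,_,_] => simp at h6

-- ===== VERDICT (by name: the statement is the Claim_ definition above) =====
theorem check_form_spec : Claim_equal_check_form := by
  intro row _
  unfold Spec_check_form check_form check_form_alt
  exact check_form_eq_alt row.toList
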